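-- pv_equiv track=rewrite | github.com/AgileSoftDev-2025/Story-Canvas-web | backend/stories/views/generation_views.py | _parse_scenario_output
-- ===== SOURCE A (Python) =====
-- def _parse_scenario_output(text):
--     """Helper to parse Gherkin scenarios from LLM output"""
--     scenarios = []
--     current_scenario = []
--     for line in text.split('\n'):
--         line = line.strip()
--         if line.startswith('Scenario:'):
--             if current_scenario: # Save the previous scenario
--                 scenarios.append('\n'.join(current_scenario))
--             current_scenario = [line] # Start a new one
--         elif line and (line.startswith(('Given', 'When', 'Then', 'And'))):
--             if current_scenario: # Only add steps if we're in a scenario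
--                 current_scenario.append(line)
--     if current_scenario: # Add the last scenario
--         scenarios.append('\n'.join(current_scenario))
--     return scenarios
-- ===== SOURCE B (Python) =====
-- def _parse_scenario_output(text):
--     """Helper to parse Gherkin scenarios from LLM output"""
--     lines = [l.strip() for l in text.split('\n')]
--     n = len(lines)
--     out = []
--     i = 0
--     while i < n and not lines[i].startswith('Scenario:'):
--         i += 1  # skip everything before the first header
--     while i < n:
--         j = i + 1
--         while j < n and not lines[j].startswith('Scenario:'):
--             j += 1
--         block = [lines[i]] + [l for l in lines[i+1:j]
--                               if l.startswith(('Given', 'When', 'Then', 'And'))]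
--         out.append('\n'.join(block))
--         i = j
--     return out
-- ===== Notes on version B (the rewrite author's own statement) =====
-- stated objective: alternative
-- what changed: Replaces the single stateful accumulating pass (scenarios + current_scenario state machine with a final flush) by a two-phase scan: strip all lines once, skip to the first 'Scenario:' header, then repeatedly slice out the range up to the next header and filter it for step lines.
import Mathlib
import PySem

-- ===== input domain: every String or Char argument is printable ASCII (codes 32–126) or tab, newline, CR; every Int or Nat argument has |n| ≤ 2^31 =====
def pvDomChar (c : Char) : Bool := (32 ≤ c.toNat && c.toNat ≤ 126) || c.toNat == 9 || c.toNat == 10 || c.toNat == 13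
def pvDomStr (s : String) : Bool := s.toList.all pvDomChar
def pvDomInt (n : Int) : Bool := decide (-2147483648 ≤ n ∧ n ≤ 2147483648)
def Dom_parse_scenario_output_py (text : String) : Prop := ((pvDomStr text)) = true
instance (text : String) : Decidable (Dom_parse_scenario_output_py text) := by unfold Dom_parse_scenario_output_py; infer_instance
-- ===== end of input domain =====

-- B replaces A's one-pass state machine by a strip-once + slice-between-headers-and-filter scan (alternative decomposition, same cost).

-- ===== PORT A =====
-- the loop body after `line = line.strip()`
def pvStepBody (st : List String × List String) (line : String) : List String × List String :=
  if PySem.Str.startswith line "Scenario:" then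
    ((if st.2.isEmpty then st.1 else st.1 ++ [PySem.Str.join "\n" st.2]), [line])
  else if (!(line == "")) && (PySem.Str.startswith line "Given" || PySem.Str.startswith line "When" ||
          PySem.Str.startswith line "Then" || PySem.Str.startswith line "And") then
    (if st.2.isEmpty then st else (st.1, st.2 ++ [line]))
  else st

def pvStepA (st : List String × List String) (line : String) : List String × List String :=
  pvStepBody st (PySem.Str.strip line)

def parse_scenario_output_py (text : String) : List String :=
  let st := ((PySem.Str.split? text "\n").getD []).foldl pvStepA ([], [])
  if st.2.isEmpty then st.1 else st.1 ++ [PySem.Str.join "\n" st.2]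

-- ===== PORT B =====
def pvIsHeader (l : String) : Bool := PySem.Str.startswith l "Scenario:"

def pvIsStep (l : String) : Bool :=
  PySem.Str.startswith l "Given" || PySem.Str.startswith l "When" ||
  PySem.Str.startswith l "Then" || PySem.Str.startswith l "And"

-- the outer `while i < n` loop: head is the current header, scan to the next header
def pvBlocks : List String → List String
  | [] => []
  | h :: rest =>
      PySem.Str.join "\n" (h :: (rest.takeWhile (fun l => !pvIsHeader l)).filter pvIsStep) ::
        pvBlocks (rest.dropWhile (fun l => !pvIsHeader l))
termination_by l => l.length
decreasing_by
  simpa using Nat.lt_succ_of_le (List.length_dropWhile_le _ _)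

def parse_scenario_output_py_alt (text : String) : List String :=
  let lines := ((PySem.Str.split? text "\n").getD []).map PySem.Str.strip
  pvBlocks (lines.dropWhile (fun l => !pvIsHeader l))

-- ===== PRECONDITION & SPEC =====
def Spec_parse_scenario_output_py (text : String) (out : List String) : Prop := out = parse_scenario_output_py_alt text
instance (text : String) (out : List String) : Decidable (Spec_parse_scenario_output_py text out) := by unfold Spec_parse_scenario_output_py; infer_instance

-- ===== CLAIM (what is proved, stated in full; the proofs are below) =====
def Claim_equal_parse_scenario_output_py : Prop := ∀ (text : String), Dom_parse_scenario_output_py text → Spec_parse_scenario_output_py text (parse_scenario_output_py text)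

-- ===== LEMMAS AND PROOFS =====

def pvFinish (st : List String × List String) : List String :=
  if st.2.isEmpty then st.1 else st.1 ++ [PySem.Str.join "\n" st.2]

lemma pvBlocks_nil : pvBlocks [] = [] := by rw [pvBlocks.eq_def]

lemma pvBlocks_cons (h : String) (rest : List String) :
    pvBlocks (h :: rest) =
      PySem.Str.join "\n" (h :: (rest.takeWhile (fun l => !pvIsHeader l)).filter pvIsStep) ::
        pvBlocks (rest.dropWhile (fun l => !pvIsHeader l)) := by rw [pvBlocks.eq_def]

-- a line satisfies A's step condition iff it satisfies B's filter predicate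
lemma pvStepCond (l : String) :
    ((!(l == "")) && (PySem.Str.startswith l "Given" || PySem.Str.startswith l "When" ||
      PySem.Str.startswith l "Then" || PySem.Str.startswith l "And")) = pvIsStep l := by
  by_cases h : l = ""
  · subst h; decide
  · simp [pvIsStep, h]

-- invariant for a non-empty current scenario
lemma pvFold_active (L : List String) : ∀ (scens cur : List String), cur ≠ [] →
    pvFinish (L.foldl pvStepBody (scens, cur)) =
      scens ++ PySem.Str.join "\n" (cur ++ (L.takeWhile (fun l => !pvIsHeader l)).filter pvIsStep) ::
        pvBlocks (L.dropWhile (fun l => !pvIsHeader l)) := by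
  induction L with
  | nil => intro scens cur hcur; simp [pvFinish, pvBlocks_nil, hcur]
  | cons l rest ih =>
    intro scens cur hcur
    by_cases hH : pvIsHeader l = true
    · have h1 : List.foldl pvStepBody (scens, cur) (l :: rest)
          = List.foldl pvStepBody (scens ++ [PySem.Str.join "\n" cur], [l]) rest := by
        simp [pvStepBody, pvIsHeader] at hH ⊢
        simp [hH, hcur]
      rw [h1, ih _ _ (by simp)]
      rw [List.takeWhile_cons, List.dropWhile_cons]
      simp [hH, pvBlocks_cons]
    · have hnH : pvIsHeader l = false := by simpa using hH
      by_cases hS : pvIsStep l = true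
      · have h1 : List.foldl pvStepBody (scens, cur) (l :: rest)
            = List.foldl pvStepBody (scens, cur ++ [l]) rest := by
          simp only [List.foldl_cons, pvStepBody, pvStepCond]
          simp [pvIsHeader] at hnH
          simp [hnH, hS, hcur]
        rw [h1, ih _ _ (by simp)]
        simp [hnH, hS]
      · have hnS : pvIsStep l = false := by simpa using hS
        have h1 : List.foldl pvStepBody (scens, cur) (l :: rest)
            = List.foldl pvStepBody (scens, cur) rest := by
          simp only [List.foldl_cons, pvStepBody, pvStepCond]
          simp [pvIsHeader] at hnH
          simp [hnH, hnS]
        rw [h1, ih _ _ hcur]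
        simp [hnH, hnS]

-- invariant before the first header
lemma pvFold_idle (L : List String) : ∀ (scens : List String),
    pvFinish (L.foldl pvStepBody (scens, [])) =
      scens ++ pvBlocks (L.dropWhile (fun l => !pvIsHeader l)) := by
  induction L with
  | nil => intro scens; simp [pvFinish, pvBlocks_nil]
  | cons l rest ih =>
    intro scens
    by_cases hH : pvIsHeader l = true
    · have h1 : List.foldl pvStepBody (scens, ([] : List String)) (l :: rest)
          = List.foldl pvStepBody (scens, [l]) rest := by
        simp [pvStepBody, pvIsHeader] at hH ⊢
        simp [hH]
      rw [h1, pvFold_active _ _ _ (by simp)]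
      rw [List.dropWhile_cons]
      simp [hH, pvBlocks_cons]
    · have hnH : pvIsHeader l = false := by simpa using hH
      have h1 : List.foldl pvStepBody (scens, ([] : List String)) (l :: rest)
          = List.foldl pvStepBody (scens, []) rest := by
        simp only [List.foldl_cons, pvStepBody, pvStepCond]
        simp [pvIsHeader] at hnH
        simp [hnH]
      rw [h1, ih]
      simp [hnH]

-- ===== VERDICT (by name: the statement is the Claim_ definition above) =====
theorem parse_scenario_output_py_spec : Claim_equal_parse_scenario_output_py := by
  intro text _
  unfold Spec_parse_scenario_output_py parse_scenario_output_py parse_scenario_output_py_alt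
  have h : ((PySem.Str.split? text "\n").getD []).foldl pvStepA ([], [])
      = (((PySem.Str.split? text "\n").getD []).map PySem.Str.strip).foldl pvStepBody ([], []) := by
    rw [List.foldl_map]; rfl
  simp only [h]
  simpa [pvFinish] using pvFold_idle (((PySem.Str.split? text "\n").getD []).map PySem.Str.strip) []
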